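-- pv_equiv track=rewrite | github.com/pypi-data/pypi-mirror-402 | packages/gnosisllm-knowledge/gnosisllm_knowledge-0.4.0-py3-none-any.whl/gnosisllm_knowledge/chunking/sentence.py | _find_best_boundary
-- ===== SOURCE A (Python) =====
-- def _find_best_boundary(
--
--     boundaries: list[int],
--     start_pos: int,
--     end_pos: int,
--     chunk_size: int,
-- ) -> int | None:
--     """Find the best sentence boundary for chunking.
--
--     Tries to find a boundary close to end_pos but not too close
--     to start_pos.
--
--     Args:
--         boundaries: List of sentence boundaries.
--         start_pos: Chunk start position.
--         end_pos: Desired end position.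
--         chunk_size: Target chunk size.
--
--     Returns:
--         Best boundary position or None if none found.
--     """
--     min_pos = start_pos + (chunk_size // 2)  # Don't split too early
--     best = None
--
--     for boundary in boundaries:
--         if boundary <= start_pos:
--             continue
--         if boundary > end_pos:
--             break
--         if boundary >= min_pos:
--             best = boundary
--
--     return best
-- ===== SOURCE B (Python) =====
-- def _find_best_boundary(
--     boundaries: list[int],
--     start_pos: int,
--     end_pos: int,
--     chunk_size: int,
-- ) -> int | None:
--     # Back-to-front search: cut the list at the first boundary past end_pos,
--     # then return the first (i.e. rightmost) boundary in that prefix that is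
--     # at least lo = max(start_pos + 1, start_pos + chunk_size // 2).
--     lo = max(start_pos + 1, start_pos + (chunk_size // 2))
--     cut = len(boundaries)
--     for i, b in enumerate(boundaries):
--         if b > end_pos:
--             cut = i
--             break
--     for b in reversed(boundaries[:cut]):
--         if b >= lo:
--             return b
--     return None
-- ===== Notes on version B (the rewrite author's own statement) =====
-- stated objective: alternative
-- what changed: Replaces A's forward scan with a last-match accumulator by a cut at the first boundary past end_pos followed by a back-to-front search that returns at the first qualifying boundary (no accumulator).
import Mathlib
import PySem

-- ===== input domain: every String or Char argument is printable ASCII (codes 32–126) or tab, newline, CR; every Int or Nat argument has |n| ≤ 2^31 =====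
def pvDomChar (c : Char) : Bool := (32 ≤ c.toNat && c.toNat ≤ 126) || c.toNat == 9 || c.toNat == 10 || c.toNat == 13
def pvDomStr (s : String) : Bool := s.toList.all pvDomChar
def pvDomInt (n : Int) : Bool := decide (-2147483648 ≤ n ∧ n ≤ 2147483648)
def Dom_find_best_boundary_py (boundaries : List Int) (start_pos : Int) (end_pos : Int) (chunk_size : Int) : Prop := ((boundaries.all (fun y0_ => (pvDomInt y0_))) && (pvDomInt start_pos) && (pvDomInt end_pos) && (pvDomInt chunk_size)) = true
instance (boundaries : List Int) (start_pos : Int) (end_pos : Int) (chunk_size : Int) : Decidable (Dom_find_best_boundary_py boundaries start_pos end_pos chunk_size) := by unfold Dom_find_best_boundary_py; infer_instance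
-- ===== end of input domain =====

-- B replaces A's forward scan with last-match accumulator by a cut at the first
-- boundary past end_pos followed by a back-to-front search (alternative, same cost).


-- ===== PORT A =====
-- A's for-loop with continue/break and the `best` accumulator, step for step.
def fbbLoop (s e m : Int) : List Int → Option Int → Option Int
  | [], best => best
  | b :: rest, best =>
    if b ≤ s then fbbLoop s e m rest best
    else if b > e then best
    else if b ≥ m then fbbLoop s e m rest (some b)
    else fbbLoop s e m rest best

def find_best_boundary_py (boundaries : List Int) (start_pos : Int) (end_pos : Int) (chunk_size : Int) : Option Int :=
  let min_pos := start_pos + PySem.Int.floordiv chunk_size 2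
  fbbLoop start_pos end_pos min_pos boundaries none

-- ===== PORT B =====
-- index of the first boundary > end_pos (length if none): B's first loop
def fbbCut (e : Int) : List Int → Nat
  | [] => 0
  | b :: rest => if b > e then 0 else 1 + fbbCut e rest

-- back-to-front search (B iterates reversed(prefix) and returns the first hit)
def fbbFind (lo : Int) : List Int → Option Int
  | [] => none
  | b :: rest => if b ≥ lo then some b else fbbFind lo rest

def find_best_boundary_py_alt (boundaries : List Int) (start_pos : Int) (end_pos : Int) (chunk_size : Int) : Option Int :=
  let lo := max (start_pos + 1) (start_pos + PySem.Int.floordiv chunk_size 2)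
  fbbFind lo ((boundaries.take (fbbCut end_pos boundaries)).reverse)

-- ===== PRECONDITION & SPEC =====
def Spec_find_best_boundary_py (boundaries : List Int) (start_pos : Int) (end_pos : Int) (chunk_size : Int) (out : Option Int) : Prop := out = find_best_boundary_py_alt boundaries start_pos end_pos chunk_size
instance (boundaries : List Int) (start_pos : Int) (end_pos : Int) (chunk_size : Int) (out : Option Int) : Decidable (Spec_find_best_boundary_py boundaries start_pos end_pos chunk_size out) := by unfold Spec_find_best_boundary_py; infer_instance

-- ===== CLAIM (what is proved, stated in full; the proofs are below) =====
def Claim_equal_find_best_boundary_py : Prop := ∀ (boundaries : List Int) (start_pos : Int) (end_pos : Int) (chunk_size : Int), Dom_find_best_boundary_py boundaries start_pos end_pos chunk_size → Spec_find_best_boundary_py boundaries start_pos end_pos chunk_size (find_best_boundary_py boundaries start_pos end_pos chunk_size)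

-- ===== LEMMAS AND PROOFS =====

-- once end_pos < start_pos (as after A skips an element ≤ start_pos that is > end_pos),
-- the loop can never update best, so it returns best unchanged
theorem fbbLoop_const (s e m : Int) (h : e < s) :
    ∀ (l : List Int) (best : Option Int), fbbLoop s e m l best = best := by
  intro l
  induction l with
  | nil => intro best; rfl
  | cons b rest ih =>
    intro best
    simp only [fbbLoop]
    split_ifs with h1 h2 h3 <;> try (first | exact ih best | rfl)
    omega

theorem fbbFind_append (lo : Int) (l1 l2 : List Int) :
    fbbFind lo (l1 ++ l2) = (fbbFind lo l1).orElse (fun _ => fbbFind lo l2) := by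
  induction l1 with
  | nil => simp [fbbFind]
  | cons b rest ih =>
    simp only [List.cons_append, fbbFind]
    split_ifs with h
    · rfl
    · exact ih

-- the main invariant: A's loop from accumulator `best` equals B's back-to-front
-- search on the cut prefix, falling back to `best`
theorem fbbLoop_eq_find (s e m : Int) :
    ∀ (l : List Int) (best : Option Int),
      fbbLoop s e m l best =
        ((fbbFind (max (s + 1) m) ((l.take (fbbCut e l)).reverse)).elim best some) := by
  intro l
  induction l with
  | nil => intro best; rfl
  | cons b rest ih =>
    intro best
    by_cases hbe : b > e
    · -- cut here: prefix empty
      simp only [fbbLoop, fbbCut, if_pos hbe, List.take_zero, List.reverse_nil]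
      split_ifs with h1 h3
      · -- b ≤ s: A continues, but e < b ≤ s so it never updates best
        exact fbbLoop_const s e m (by omega) rest best
      · rfl
      all_goals exact absurd hbe h3
    · -- b ≤ e: prefix is b :: (cut prefix of rest)
      simp only [fbbLoop, fbbCut, if_neg hbe]
      rw [show (1 + fbbCut e rest) = (fbbCut e rest) + 1 by omega]
      simp only [List.take_succ_cons, List.reverse_cons, fbbFind_append]
      split_ifs with h1 h3
      · -- b ≤ s: b < lo, so the [b] search misses
        have hb : ¬ (b ≥ max (s + 1) m) := by
          have := le_max_left (s + 1) m; omega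
        simp only [fbbFind, if_neg hb]
        rw [ih best]
        cases fbbFind (max (s + 1) m) ((rest.take (fbbCut e rest)).reverse) <;> rfl
      · -- b qualifies
        have hb : b ≥ max (s + 1) m := by
          have := max_le_iff (a := s+1) (b := m) (c := b); omega
        simp only [fbbFind, if_pos hb]
        rw [ih (some b)]
        cases fbbFind (max (s + 1) m) ((rest.take (fbbCut e rest)).reverse) <;> rfl
      · -- b in range but below min_pos
        have hb : ¬ (b ≥ max (s + 1) m) := by
          have := le_max_right (s + 1) m; omega
        simp only [fbbFind, if_neg hb]
        rw [ih best]
        cases fbbFind (max (s + 1) m) ((rest.take (fbbCut e rest)).reverse) <;> rfl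

-- ===== VERDICT (by name: the statement is the Claim_ definition above) =====
theorem find_best_boundary_py_spec : Claim_equal_find_best_boundary_py := by
  intro boundaries s e c _
  unfold Spec_find_best_boundary_py find_best_boundary_py find_best_boundary_py_alt
  rw [fbbLoop_eq_find]
  cases fbbFind (max (s + 1) (s + PySem.Int.floordiv c 2))
      ((boundaries.take (fbbCut e boundaries)).reverse) <;> rfl
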